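-- pv_equiv track=rewrite | github.com/merstad/inf200-advanced-programming | exercises/week_40/lists_to_records.py | to_records_comprehesion
-- ===== SOURCE A (Python) =====
-- def to_records_comprehesion(data):
--     """
--     Implemenation using list comprehesion-dictionary comprehension combo to build list.
--     """
--
--     if not data:
--         return []
--
--     # Create set of list lengths, must have only a single element
--     num_records_set = set(len(vals) for vals in data.values())
--     assert len(num_records_set) == 1, "Lists must have same length"
--
--     # Get the one element of the set
--     num_records = num_records_set.pop()
--
--     # The list comprehension goes through the entries in the lists, building
--     # a dictionary for each by dictionary comprehesion.
--     recs = [{key: data[key][record_number] for key in data.keys()}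
--             for record_number in range(num_records)]
--
--     return recs
-- ===== SOURCE B (Python) =====
-- def to_records_comprehesion(data):
--     """
--     Transpose via zip over the value columns instead of per-record index lookups.
--     """
--     if not data:
--         return []
--
--     # Same equal-length check as A: zip would silently truncate otherwise.
--     num_records_set = set(len(vals) for vals in data.values())
--     assert len(num_records_set) == 1, "Lists must have same length"
--
--     keys = list(data.keys())
--     return [dict(zip(keys, row)) for row in zip(*data.values())]
-- ===== Notes on version B (the rewrite author's own statement) =====
-- stated objective: idiomatic
-- what changed: Replaces the per-record dict comprehension with data[key][record_number] index lookups by a single column transpose: zip(*data.values()) yields the rows and each record is dict(zip(keys, row)).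
import Mathlib
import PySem

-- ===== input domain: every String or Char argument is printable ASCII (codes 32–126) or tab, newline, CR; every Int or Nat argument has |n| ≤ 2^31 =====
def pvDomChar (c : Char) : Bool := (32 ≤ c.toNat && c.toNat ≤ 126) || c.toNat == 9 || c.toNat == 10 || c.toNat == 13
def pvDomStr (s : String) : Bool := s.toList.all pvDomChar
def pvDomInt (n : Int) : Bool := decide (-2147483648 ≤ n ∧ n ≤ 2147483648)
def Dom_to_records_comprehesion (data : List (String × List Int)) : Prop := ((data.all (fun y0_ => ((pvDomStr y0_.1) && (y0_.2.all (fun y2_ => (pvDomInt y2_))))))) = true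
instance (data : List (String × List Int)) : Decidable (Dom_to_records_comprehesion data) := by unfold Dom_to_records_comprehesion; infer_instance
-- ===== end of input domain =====

-- B transposes the columns with zip(*values) and zips each row with the keys, instead of
-- A's per-record dict comprehension indexing data[key][record_number]; return values only.

-- ===== PORT A =====
-- Transliteration of A. Under Pre_ the set of lengths is a singleton, so `set.pop()`
-- (otherwise hash-order dependent) is its unique element, modelled by headD.
def to_records_comprehesion (data : List (String × List Int)) : List (List (String × Int)) :=
  if data = [] then []
  else
    let num_records_set : PySem.Set Int :=
      PySem.Set.ofList (data.map (fun kv => (kv.2.length : Int)))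
    -- assert len(num_records_set) == 1  (guaranteed by Pre_, excluded otherwise)
    let num_records := num_records_set.headD 0
    (PySem.List.pyRange 0 num_records 1).map (fun record_number =>
      data.map (fun kv => (kv.1, PySem.List.pyGetD kv.2 record_number 0)))

-- ===== PORT B =====
-- zip(*cols): rows until some column is exhausted; fuel = first column's length
-- (zip stops at the shortest column, and the first column is exhausted when the fuel is).
def pvZipStarGo : Nat → List (List Int) → List (List Int)
  | 0, _ => []
  | n + 1, cols =>
      if cols.any (·.isEmpty) then []
      else cols.map (fun c => c.headD 0) :: pvZipStarGo n (cols.map List.tail)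

def pvZipStar (cols : List (List Int)) : List (List Int) :=
  match cols with
  | [] => []
  | c :: rest => pvZipStarGo c.length (c :: rest)

def to_records_comprehesion_alt (data : List (String × List Int)) : List (List (String × Int)) :=
  if data = [] then []
  else
    -- assert len(set(lengths)) == 1  (guaranteed by Pre_, excluded otherwise)
    let keys := data.map Prod.fst
    (pvZipStar (data.map Prod.snd)).map (fun row => keys.zip row)

-- ===== PRECONDITION & SPEC =====
-- Pre_ excludes exactly the inputs where A's assert fails (AssertionError): value lists of unequal length.
def Pre_to_records_comprehesion (data : List (String × List Int)) : Prop :=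
  ∀ p ∈ data, ∀ q ∈ data, p.2.length = q.2.length
instance (data : List (String × List Int)) : Decidable (Pre_to_records_comprehesion data) := by
  unfold Pre_to_records_comprehesion; infer_instance

def pvWitness_to_records_comprehesion : (List (String × List Int)) :=
  [("a", [1, 2]), ("b", [3, 4])]

def Spec_to_records_comprehesion (data : List (String × List Int)) (out : List (List (String × Int))) : Prop := out = to_records_comprehesion_alt data
instance (data : List (String × List Int)) (out : List (List (String × Int))) : Decidable (Spec_to_records_comprehesion data out) := by unfold Spec_to_records_comprehesion; infer_instance

-- ===== CLAIM (what is proved, stated in full; the proofs are below) =====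
def Claim_equal_to_records_comprehesion : Prop := ∀ (data : List (String × List Int)), Dom_to_records_comprehesion data → Pre_to_records_comprehesion data → Spec_to_records_comprehesion data (to_records_comprehesion data)

-- ===== LEMMAS AND PROOFS =====

-- A list whose members are all `a` dedups to `[a]` (or `[]` when empty).
theorem pv_ofList_const {a : Int} : ∀ (xs : List Int), (∀ x ∈ xs, x = a) →
    PySem.Set.ofList xs = if xs = [] then [] else [a] := by
  intro xs
  induction xs with
  | nil => intro _; simp
  | cons y ys ih =>
    intro h
    have hy : y = a := h y (by simp)
    have hys : ∀ x ∈ ys, x = a := fun x hx => h x (by simp [hx])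
    rw [PySem.Set.ofList_cons, ih hys, hy]
    by_cases hn : ys = [] <;> simp [hn, PySem.Set.discard]

-- zip(*cols) as an index map, when every column has length n.
theorem pv_zipStarGo_eq (n : Nat) : ∀ (cols : List (List Int)),
    (∀ c ∈ cols, c.length = n) →
    pvZipStarGo n cols = (List.range n).map (fun r => cols.map (fun c => c.getD r 0)) := by
  induction n with
  | zero => intro cols _; simp [pvZipStarGo]
  | succ n ih =>
    intro cols h
    have hne : ∀ c ∈ cols, c ≠ [] := by
      intro c hc hE
      have hlen := h c hc
      rw [hE] at hlen; simp at hlen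
    have hany : cols.any (·.isEmpty) = false := by
      rw [List.any_eq_false]
      intro c hc
      simp [List.isEmpty_iff, hne c hc]
    rw [pvZipStarGo, hany]
    simp only [Bool.false_eq_true, if_false]
    have htails : ∀ c ∈ cols.map List.tail, c.length = n := by
      intro c hc
      obtain ⟨c', hc', rfl⟩ := List.mem_map.1 hc
      have hlen := h c' hc'
      rw [List.length_tail]
      omega
    rw [ih _ htails, List.range_succ_eq_map]
    simp only [List.map_cons, List.map_map]
    congr 1
    · apply List.map_congr_left
      intro c hc
      have := hne c hc
      cases c with
      | nil => simp_all
      | cons x xs => simp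
    · apply List.map_congr_left
      intro r _
      simp only [Function.comp]
      apply List.map_congr_left
      intro c hc
      have := hne c hc
      cases c with
      | nil => simp_all
      | cons x xs => simp

-- ===== VERDICT (by name: the statement is the Claim_ definition above) =====
theorem to_records_comprehesion_spec : Claim_equal_to_records_comprehesion := by
  intro data _ hpre
  unfold Spec_to_records_comprehesion to_records_comprehesion to_records_comprehesion_alt
  cases data with
  | nil => simp
  | cons kv rest =>
    simp only [reduceCtorEq, if_false]
    have hall : ∀ x ∈ (kv :: rest).map (fun kv => (kv.2.length : Int)), x = (kv.2.length : Int) := by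
      intro x hx
      obtain ⟨p, hp, rfl⟩ := List.mem_map.1 hx
      exact_mod_cast hpre p hp kv (by simp)
    rw [pv_ofList_const _ hall]
    simp only [List.map_cons, reduceCtorEq, if_false, List.headD_cons]
    rw [PySem.List.pyRange_zero_nat]
    show _ = (pvZipStarGo kv.2.length (kv.2 :: rest.map Prod.snd)).map _
    have hcols : ∀ c ∈ kv.2 :: rest.map Prod.snd, c.length = kv.2.length := by
      intro c hc
      rcases List.mem_cons.1 hc with rfl | hc
      · rfl
      · obtain ⟨p, hp, rfl⟩ := List.mem_map.1 hc
        exact hpre p (by simp [hp]) kv (by simp)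
    rw [pv_zipStarGo_eq kv.2.length _ hcols]
    simp only [List.map_map]
    apply List.map_congr_left
    intro r _
    simp only [Function.comp]
    have hcol2 : kv.2 :: rest.map Prod.snd = (kv :: rest).map Prod.snd := by simp
    have hkeys : kv.1 :: rest.map Prod.fst = (kv :: rest).map Prod.fst := by simp
    rw [hcol2, List.map_map, hkeys, List.zip_map']
    simp [PySem.List.pyGetD_natCast]
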